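-- pv_equiv track=rewrite | github.com/DongKey777/woowa-learning-hub | scripts/workbench/core/orchestrator.py | _queue_summary
-- ===== SOURCE A (Python) =====
-- from typing import Any
--
-- QUEUE_PENDING = "pending"
--
-- def _queue_summary(items: list[dict[str, Any]]) -> tuple[dict[str, int], dict[str, dict[str, int]]]:
--     summary = {"pending": 0, "leased": 0, "completed": 0, "blocked": 0, "total": len(items)}
--     lane_summary: dict[str, dict[str, int]] = {}
--     for item in items:
--         status = item.get("status", QUEUE_PENDING)
--         summary[status] = summary.get(status, 0) + 1
--         lane = item["lane"]
--         lane_entry = lane_summary.setdefault(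
--             lane,
--             {"pending": 0, "leased": 0, "completed": 0, "blocked": 0, "total": 0},
--         )
--         lane_entry["total"] += 1
--         lane_entry[status] = lane_entry.get(status, 0) + 1
--     return summary, lane_summary
-- ===== SOURCE B (Python) =====
-- QUEUE_PENDING = "pending"
--
-- def _queue_summary(items):
--     def _counts(statuses):
--         c = {}
--         for s in statuses:
--             c[s] = c.get(s, 0) + 1
--         return c
--
--     def _tally(group):
--         entry = {"pending": 0, "leased": 0, "completed": 0, "blocked": 0, "total": len(group)}
--         for status, c in _counts([it.get("status", QUEUE_PENDING) for it in group]).items():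
--             entry[status] = entry.get(status, 0) + c
--         return entry
--
--     groups = {}
--     for item in items:
--         groups.setdefault(item["lane"], []).append(item)
--     return _tally(items), {lane: _tally(group) for lane, group in groups.items()}
-- ===== Notes on version B (the rewrite author's own statement) =====
-- stated objective: alternative
-- what changed: Replaces A's single interleaved loop that mutates both tallies per item with a two-phase pipeline: group items by lane into a dict of lists, then derive the global and each per-lane tally independently by merging a status counter into the fixed five-key entry.
import Mathlib
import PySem

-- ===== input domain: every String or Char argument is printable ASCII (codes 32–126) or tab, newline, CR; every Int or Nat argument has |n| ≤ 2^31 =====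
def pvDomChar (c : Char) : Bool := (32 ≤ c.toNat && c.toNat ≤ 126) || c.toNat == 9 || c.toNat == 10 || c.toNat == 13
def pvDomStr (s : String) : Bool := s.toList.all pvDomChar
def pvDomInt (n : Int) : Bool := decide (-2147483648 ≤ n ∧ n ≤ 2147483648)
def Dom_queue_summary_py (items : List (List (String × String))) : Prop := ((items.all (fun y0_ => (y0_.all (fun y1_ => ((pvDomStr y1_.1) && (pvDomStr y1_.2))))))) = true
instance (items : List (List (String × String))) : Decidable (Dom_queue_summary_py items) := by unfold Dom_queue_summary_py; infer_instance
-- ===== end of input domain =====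

-- B replaces A's single interleaved per-item loop by a group-by-lane-then-tally pipeline (same cost, different decomposition).

-- ===== PORT A =====
-- item.get("status", QUEUE_PENDING)
def pvStatusOf (item : List (String × String)) : String :=
  (PySem.Dict.mk item).getD "status" "pending"
-- item["lane"]; exact whenever the key is present (guaranteed by Pre_; Python raises KeyError otherwise)
def pvLaneOf (item : List (String × String)) : String :=
  (PySem.Dict.mk item).getD "lane" ""
-- the setdefault default {"pending": 0, ..., "total": 0}
def pvD0 : PySem.Dict String Int :=
  PySem.Dict.mk [("pending",0),("leased",0),("completed",0),("blocked",0),("total",0)]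

def queue_summary_py (items : List (List (String × String))) : (List (String × Int)) × (List (String × List (String × Int))) :=
  let s0 : PySem.Dict String Int :=
    PySem.Dict.mk [("pending",0),("leased",0),("completed",0),("blocked",0),("total",(items.length : Int))]
  let r := items.foldl
    (fun (p : PySem.Dict String Int × PySem.Dict String (PySem.Dict String Int)) item =>
      let status := pvStatusOf item
      let s := p.1.modify status 0 (· + 1)          -- summary[status] = summary.get(status, 0) + 1
      let lane := pvLaneOf item
      let e := p.2.getD lane pvD0                   -- lane_entry = lane_summary.setdefault(lane, {...})
      let e := e.modify "total" 0 (· + 1)           -- lane_entry["total"] += 1  ("total" is always present)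
      let e := e.modify status 0 (· + 1)            -- lane_entry[status] = lane_entry.get(status, 0) + 1
      (s, p.2.insert lane e)) (s0, PySem.Dict.empty)
  (r.1.items, r.2.items.map (fun p => (p.1, p.2.items)))

-- ===== PORT B =====
-- _counts: c[s] = c.get(s, 0) + 1 over the statuses
def pvCounts (statuses : List String) : PySem.Dict String Int :=
  statuses.foldl (fun c s => c.insert s (c.getD s 0 + 1)) PySem.Dict.empty

-- _tally: fixed five-key entry with total = len(group), then merge the status counter into it
def pvTally (group : List (List (String × String))) : PySem.Dict String Int :=
  let entry : PySem.Dict String Int :=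
    PySem.Dict.mk [("pending",0),("leased",0),("completed",0),("blocked",0),("total",(group.length : Int))]
  (pvCounts (group.map pvStatusOf)).items.foldl
    (fun e p => e.insert p.1 (e.getD p.1 0 + p.2)) entry

def queue_summary_py_alt (items : List (List (String × String))) : (List (String × Int)) × (List (String × List (String × Int))) :=
  let groups := items.foldl
    (fun (g : PySem.Dict String (List (List (String × String)))) item =>
      g.modify (pvLaneOf item) [] (· ++ [item])) PySem.Dict.empty   -- groups.setdefault(item["lane"], []).append(item)
  ((pvTally items).items, groups.items.map (fun p => (p.1, (pvTally p.2).items)))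

-- ===== PRECONDITION & SPEC =====
-- Pre_ excludes exactly the items without a "lane" key: there Python A raises KeyError (and B raises it too).
def Pre_queue_summary_py (items : List (List (String × String))) : Prop :=
  ∀ item ∈ items, (PySem.Dict.mk item).contains "lane" = true
instance (items : List (List (String × String))) : Decidable (Pre_queue_summary_py items) := by
  unfold Pre_queue_summary_py; infer_instance

def pvWitness_queue_summary_py : (List (List (String × String))) :=
  [[("lane","a"),("status","leased")], [("lane","b")]]

def Spec_queue_summary_py (items : List (List (String × String))) (out : (List (String × Int)) × (List (String × List (String × Int)))) : Prop := out = queue_summary_py_alt items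
instance (items : List (List (String × String))) (out : (List (String × Int)) × (List (String × List (String × Int)))) : Decidable (Spec_queue_summary_py items out) := by unfold Spec_queue_summary_py; infer_instance

-- ===== CLAIM (what is proved, stated in full; the proofs are below) =====
def Claim_equal_queue_summary_py : Prop := ∀ (items : List (List (String × String))), Dom_queue_summary_py items → Pre_queue_summary_py items → Spec_queue_summary_py items (queue_summary_py items)

-- ===== LEMMAS AND PROOFS =====

lemma pv_get?_mk_nil (k : String) : (PySem.Dict.mk ([] : List (String × Int))).get? k = none := rfl
lemma pv_entry_getD (n : Int) (k : String) :
    (PySem.Dict.mk [("pending",0),("leased",0),("completed",0),("blocked",0),("total",n)]).getD k 0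
      = if k = "total" then n else 0 := by
  rw [PySem.Dict.getD_eq_get?_getD, PySem.Dict.get?_mk_cons, PySem.Dict.get?_mk_cons,
      PySem.Dict.get?_mk_cons, PySem.Dict.get?_mk_cons, PySem.Dict.get?_mk_cons, pv_get?_mk_nil]
  split_ifs <;> simp_all
lemma pv_filter_nodup (l : List String) (k : String) (h : l.Nodup) :
    l.filter (fun j => j == k) = if k ∈ l then [k] else [] := by
  induction l with
  | nil => simp
  | cons a l ih =>
    simp only [List.nodup_cons] at h
    by_cases hk : a = k
    · subst hk; simp; exact fun j hj hja => h.1 (hja ▸ hj)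
    · simp [hk, ih h.2, List.mem_cons, Ne.symm hk]
lemma pv_getD_foldl_insert_pairs (l : List (String × Int)) (e : PySem.Dict String Int) (k : String) :
    (l.foldl (fun e p => e.insert p.1 (e.getD p.1 0 + p.2)) e).getD k 0
      = e.getD k 0 + ((l.filter (fun p => p.1 == k)).map (·.2)).sum := by
  induction l generalizing e with
  | nil => simp
  | cons p l ih =>
    rw [List.foldl_cons, ih, List.filter_cons]
    by_cases hk : p.1 = k
    · simp [hk]
      ring
    · simp [hk, PySem.Dict.getD_insert, Ne.symm hk]

lemma pv_counts_eq (xs : List String) : pvCounts xs = PySem.Dict.counter xs :=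
  PySem.Dict.foldl_insert_getD_add_one_eq_counter xs

lemma pv_counter_sum (xs : List String) (k : String) :
    (((PySem.Dict.counter xs).items.filter (fun p => p.1 == k)).map (·.2)).sum = (xs.count k : Int) := by
  rw [PySem.Dict.items_counter, List.filter_map]
  have : ((fun p => p.1 == k) ∘ fun j => (j, (xs.count j : Int))) = fun j => j == k := rfl
  rw [this, pv_filter_nodup _ _ (PySem.Set.nodup_ofList xs)]
  by_cases h : k ∈ xs
  · simp [PySem.Set.mem_ofList, h]
  · simp [PySem.Set.mem_ofList, h, List.count_eq_zero_of_not_mem h]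

lemma pv_tally_getD (g : List (List (String × String))) (k : String) :
    (pvTally g).getD k 0
      = (if k = "total" then (g.length : Int) else 0) + ((g.map pvStatusOf).count k : Int) := by
  simp only [pvTally]
  rw [pv_getD_foldl_insert_pairs, pv_entry_getD, pv_counts_eq, pv_counter_sum]

lemma pv_update_ofList (s : List String) (xs : List String) :
    PySem.Set.update s (PySem.Set.ofList xs) = PySem.Set.update s xs := by
  rw [PySem.Set.update_eq_append_filter, PySem.Set.update_eq_append_filter, PySem.Set.ofList_ofList]

lemma pv_tally_keys (g : List (List (String × String))) :
    (pvTally g).keys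
      = PySem.Set.update ["pending","leased","completed","blocked","total"] (g.map pvStatusOf) := by
  simp only [pvTally]
  rw [PySem.Dict.keys_foldl_insert_key, pv_counts_eq]
  have h1 : (PySem.Dict.mk [("pending",(0:Int)),("leased",0),("completed",0),("blocked",0),("total",(g.length:Int))]).keys = ["pending","leased","completed","blocked","total"] := rfl
  have h2 : (PySem.Dict.counter (g.map pvStatusOf)).items.map (fun p => p.1) = (PySem.Dict.counter (g.map pvStatusOf)).keys := rfl
  rw [h1, h2, PySem.Dict.keys_counter, pv_update_ofList]

lemma pv_tally_nodup (g : List (List (String × String))) : (pvTally g).keys.Nodup := by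
  rw [pv_tally_keys]
  exact PySem.Set.nodup_update _ _ (by decide)

def pvStepE (e : PySem.Dict String Int) (it : List (String × String)) : PySem.Dict String Int :=
  (e.modify "total" 0 (· + 1)).modify (pvStatusOf it) 0 (· + 1)

lemma pv_stepE_getD (g : List (List (String × String))) (e : PySem.Dict String Int) (k : String) :
    (g.foldl pvStepE e).getD k 0
      = e.getD k 0 + (if k = "total" then (g.length : Int) else 0) + ((g.map pvStatusOf).count k : Int) := by
  induction g generalizing e with
  | nil => simp
  | cons it g ih =>
    rw [List.foldl_cons, ih]
    simp only [pvStepE, PySem.Dict.getD_modify, List.length_cons, List.map_cons, List.count_cons]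
    split_ifs <;> simp_all <;> ring

lemma pv_keys_modify_add (d : PySem.Dict String Int) (k : String) (d0 : Int) (f : Int → Int) :
    (d.modify k d0 f).keys = PySem.Set.add d.keys k := by
  rw [PySem.Dict.keys_modify]
  by_cases h : k ∈ d.keys
  · rw [PySem.Dict.keys_insert_of_contains _ _ ((PySem.Dict.contains_iff_mem_keys d k).mpr h),
        PySem.Set.add_of_mem h]
  · rw [PySem.Dict.keys_insert_of_not_contains _ _ (by simp [PySem.Dict.contains_eq_decide_mem_keys, h]),
        PySem.Set.add_of_not_mem h]

lemma pv_stepE_keys (g : List (List (String × String))) (e : PySem.Dict String Int)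
    (h : "total" ∈ e.keys) :
    (g.foldl pvStepE e).keys = PySem.Set.update e.keys (g.map pvStatusOf) := by
  induction g generalizing e with
  | nil => simp [PySem.Set.update_nil]
  | cons it g ih =>
    rw [List.foldl_cons, List.map_cons, PySem.Set.update_cons]
    rw [ih]
    · congr 1
      simp only [pvStepE, pv_keys_modify_add]
      rw [PySem.Set.add_of_mem h]
    · simp only [pvStepE, pv_keys_modify_add]
      exact (PySem.Set.mem_add _ _ _).mpr (Or.inl ((PySem.Set.mem_add _ _ _).mpr (Or.inl h)))

lemma pv_dict_eq (d d' : PySem.Dict String Int) (hd : d.keys.Nodup) (hd' : d'.keys.Nodup)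
    (hk : d.keys = d'.keys) (hg : ∀ k, d.getD k 0 = d'.getD k 0) : d = d' := by
  apply PySem.Dict.ext
  rw [PySem.Dict.items_eq_map_keys d hd 0, PySem.Dict.items_eq_map_keys d' hd' 0, hk]
  exact List.map_congr_left (fun k _ => by rw [hg])

lemma pv_entry_eq_tally (g : List (List (String × String))) :
    g.foldl pvStepE pvD0 = pvTally g := by
  apply pv_dict_eq
  · rw [pv_stepE_keys _ _ (by decide)]
    exact PySem.Set.nodup_update _ _ (by decide)
  · exact pv_tally_nodup g
  · rw [pv_stepE_keys _ _ (by decide), pv_tally_keys]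
    rfl
  · intro k
    rw [pv_stepE_getD, pv_tally_getD]
    have h0 : pvD0.getD k 0 = 0 := by simpa using pv_entry_getD 0 k
    rw [h0]
    ring

lemma pv_summary_eq (items : List (List (String × String))) :
    items.foldl (fun s it => s.modify (pvStatusOf it) 0 (· + 1))
      (PySem.Dict.mk [("pending",0),("leased",0),("completed",0),("blocked",0),("total",(items.length : Int))])
    = pvTally items := by
  apply pv_dict_eq
  · apply PySem.Dict.nodup_keys_foldl_modify_key items pvStatusOf 0 (fun d x => (· + 1))
    have hk : (PySem.Dict.mk [("pending",(0:Int)),("leased",0),("completed",0),("blocked",0),("total",(items.length : Int))]).keys = ["pending","leased","completed","blocked","total"] := rfl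
    rw [hk]; decide
  · exact pv_tally_nodup items
  · rw [PySem.Dict.keys_foldl_modify_key items pvStatusOf 0 (fun d x => (· + 1)), pv_tally_keys]
    rfl
  · intro k
    have hm : items.foldl (fun s it => s.modify (pvStatusOf it) 0 (· + 1))
        (PySem.Dict.mk [("pending",0),("leased",0),("completed",0),("blocked",0),("total",(items.length : Int))])
      = (items.map pvStatusOf).foldl (fun d x => d.modify x 0 (· + 1))
        (PySem.Dict.mk [("pending",0),("leased",0),("completed",0),("blocked",0),("total",(items.length : Int))]) :=
      (List.foldl_map (f := pvStatusOf) (g := fun (d : PySem.Dict String Int) (x : String) => d.modify x 0 (· + 1))).symm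
    rw [hm, PySem.Dict.getD_foldl_modify_add_one, pv_entry_getD, pv_tally_getD]

def pvStepL (L : PySem.Dict String (PySem.Dict String Int)) (it : List (String × String)) :
    PySem.Dict String (PySem.Dict String Int) :=
  L.insert (pvLaneOf it) (pvStepE (L.getD (pvLaneOf it) pvD0) it)

lemma pv_lanes_get? (xs : List (List (String × String))) (L : PySem.Dict String (PySem.Dict String Int))
    (lane : String) :
    (xs.foldl pvStepL L).get? lane =
      if lane ∈ xs.map pvLaneOf
      then some ((xs.filter (fun it => pvLaneOf it == lane)).foldl pvStepE (L.getD lane pvD0))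
      else L.get? lane := by
  induction xs generalizing L with
  | nil => simp
  | cons it xs ih =>
    rw [List.foldl_cons, ih, List.filter_cons]
    by_cases h1 : lane = pvLaneOf it
    · subst h1
      simp only [List.map_cons, List.mem_cons, true_or, if_pos, beq_self_eq_true]
      by_cases h2 : pvLaneOf it ∈ xs.map pvLaneOf
      · rw [if_pos h2]
        have hb : (pvStepL L it).getD (pvLaneOf it) pvD0 = pvStepE (L.getD (pvLaneOf it) pvD0) it := by
          rw [show pvStepL L it = L.insert (pvLaneOf it) (pvStepE (L.getD (pvLaneOf it) pvD0) it) from rfl,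
              PySem.Dict.getD_insert, if_pos rfl]
        rw [hb, List.foldl_cons]
      · rw [if_neg h2]
        rw [show pvStepL L it = L.insert (pvLaneOf it) (pvStepE (L.getD (pvLaneOf it) pvD0) it) from rfl,
            PySem.Dict.get?_insert_self]
        have hf : xs.filter (fun j => pvLaneOf j == pvLaneOf it) = [] :=
          List.filter_eq_nil_iff.2 (fun j hj hjl =>
            h2 (beq_iff_eq.mp hjl ▸ List.mem_map.2 ⟨j, hj, rfl⟩))
        rw [hf, List.foldl_cons]
        rfl
    · have hne : (pvLaneOf it == lane) = false := beq_eq_false_iff_ne.mpr (Ne.symm h1)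
      have hmem : (lane ∈ (it :: xs).map pvLaneOf) = (lane ∈ xs.map pvLaneOf) := by
        simp [List.mem_cons, h1]
      rw [show pvStepL L it = L.insert (pvLaneOf it) (pvStepE (L.getD (pvLaneOf it) pvD0) it) from rfl]
      rw [PySem.Dict.getD_insert, PySem.Dict.get?_insert, if_neg h1, if_neg h1, hne]
      simp only [List.map_cons, List.mem_cons, h1, false_or, Bool.false_eq_true, if_false]

lemma pv_groups_getD (items : List (List (String × String))) (lane : String) :
    ((items.foldl
        (fun (g : PySem.Dict String (List (List (String × String)))) item =>
          g.modify (pvLaneOf item) [] (· ++ [item])) PySem.Dict.empty).getD lane [])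
      = items.filter (fun it => pvLaneOf it == lane) := by
  have hm : items.foldl
        (fun (g : PySem.Dict String (List (List (String × String)))) item =>
          g.modify (pvLaneOf item) [] (· ++ [item])) PySem.Dict.empty
      = (items.map (fun it => (pvLaneOf it, it))).foldl
          (fun (g : PySem.Dict String (List (List (String × String)))) p =>
            g.modify p.1 [] (· ++ [p.2])) PySem.Dict.empty :=
    (List.foldl_map (f := fun it => (pvLaneOf it, it))
      (g := fun (g : PySem.Dict String (List (List (String × String)))) p =>
        g.modify p.1 [] (· ++ [p.2]))).symm
  rw [hm, PySem.Dict.getD_foldl_modify_append, PySem.Dict.getD_empty]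
  simp only [List.filter_map, List.nil_append]
  rw [show ((fun (p : String × List (String × String)) => p.1 == lane) ∘ fun it => (pvLaneOf it, it))
        = fun it => pvLaneOf it == lane from rfl]
  rw [List.map_map]
  exact (List.map_congr_left (g := id) (fun it _ => rfl)).trans (List.map_id _)

lemma pv_lanes_eq (items : List (List (String × String))) :
    (items.foldl pvStepL PySem.Dict.empty).items.map (fun p => (p.1, p.2.items))
    = (items.foldl
        (fun (g : PySem.Dict String (List (List (String × String)))) item =>
          g.modify (pvLaneOf item) [] (· ++ [item])) PySem.Dict.empty).items.map
        (fun p => (p.1, (pvTally p.2).items)) := by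
  have hL : items.foldl pvStepL PySem.Dict.empty
      = items.foldl (fun (L : PySem.Dict String (PySem.Dict String Int)) it =>
          L.insert (pvLaneOf it) (pvStepE (L.getD (pvLaneOf it) pvD0) it)) PySem.Dict.empty := rfl
  have hLnodup : (items.foldl pvStepL PySem.Dict.empty).keys.Nodup := by
    rw [hL]
    exact PySem.Dict.nodup_keys_foldl_insert_key items pvLaneOf _ _ (by simp [PySem.Dict.keys_empty])
  have hLkeys : (items.foldl pvStepL PySem.Dict.empty).keys
      = PySem.Set.ofList (items.map pvLaneOf) := by
    rw [hL, PySem.Dict.keys_foldl_insert_key items pvLaneOf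
          (fun L it => pvStepE (L.getD (pvLaneOf it) pvD0) it),
        PySem.Dict.keys_empty, PySem.Set.update_nil_left]
  have hGnodup : (items.foldl
      (fun (g : PySem.Dict String (List (List (String × String)))) item =>
        g.modify (pvLaneOf item) [] (· ++ [item])) PySem.Dict.empty).keys.Nodup :=
    PySem.Dict.nodup_keys_foldl_modify_key items pvLaneOf [] _ _ (by simp [PySem.Dict.keys_empty])
  have hGkeys : (items.foldl
      (fun (g : PySem.Dict String (List (List (String × String)))) item =>
        g.modify (pvLaneOf item) [] (· ++ [item])) PySem.Dict.empty).keys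
      = PySem.Set.ofList (items.map pvLaneOf) := by
    rw [PySem.Dict.keys_foldl_modify_key items pvLaneOf [] (fun g it => (· ++ [it])),
        PySem.Dict.keys_empty, PySem.Set.update_nil_left]
  rw [PySem.Dict.items_eq_map_keys _ hLnodup PySem.Dict.empty,
      PySem.Dict.items_eq_map_keys _ hGnodup [],
      hLkeys, hGkeys, List.map_map, List.map_map]
  apply List.map_congr_left
  intro k hk
  have hkmem : k ∈ items.map pvLaneOf := (PySem.Set.mem_ofList _ _).mp hk
  have h1 : (items.foldl pvStepL PySem.Dict.empty).get? k
      = some ((items.filter (fun it => pvLaneOf it == k)).foldl pvStepE pvD0) := by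
    rw [pv_lanes_get?, if_pos hkmem, PySem.Dict.getD_empty]
  have h2 : (items.foldl pvStepL PySem.Dict.empty).getD k PySem.Dict.empty
      = (items.filter (fun it => pvLaneOf it == k)).foldl pvStepE pvD0 :=
    PySem.Dict.getD_of_get?_eq_some _ _ h1
  simp only [Function.comp_apply]
  rw [h2, pv_entry_eq_tally, pv_groups_getD]

lemma pv_foldA_split (xs : List (List (String × String))) (s : PySem.Dict String Int)
    (L : PySem.Dict String (PySem.Dict String Int)) :
    xs.foldl
      (fun (p : PySem.Dict String Int × PySem.Dict String (PySem.Dict String Int)) item =>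
        let status := pvStatusOf item
        let s := p.1.modify status 0 (· + 1)
        let lane := pvLaneOf item
        let e := p.2.getD lane pvD0
        let e := e.modify "total" 0 (· + 1)
        let e := e.modify status 0 (· + 1)
        (s, p.2.insert lane e)) (s, L)
    = (xs.foldl (fun s it => s.modify (pvStatusOf it) 0 (· + 1)) s, xs.foldl pvStepL L) := by
  induction xs generalizing s L with
  | nil => rfl
  | cons it xs ih => simpa [pvStepL, pvStepE] using ih _ _

-- ===== VERDICT (by name: the statement is the Claim_ definition above) =====
theorem queue_summary_py_spec : Claim_equal_queue_summary_py := by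
  intro items _ _
  unfold Spec_queue_summary_py queue_summary_py queue_summary_py_alt
  simp only [pv_foldA_split]
  exact Prod.ext (by rw [pv_summary_eq]) (pv_lanes_eq items)
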